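-- pv_equiv track=rewrite | github.com/PCBZ/AlgorithmPractise | Amazon_oa/discount_event.py | find_final_price
-- ===== SOURCE A (Python) =====
-- from typing import List
--
-- def find_final_price(prices: List[int], queries: List[List[int]]) -> List[int]:
--     for query in queries:
--         if query[0] == 1:
--             prices[query[1]] = query[2]
--         elif query[0] == 2:
--             for i, price in enumerate(prices):
--                 if price < query[1]:
--                     prices[i] = query[1]
--     return prices
-- ===== SOURCE B (Python) =====
-- from typing import List
--
-- def find_final_price(prices: List[int], queries: List[List[int]]) -> List[int]:
--     # One backward pass: suf[k] = max type-2 threshold among queries[k:] (None if none).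
--     suf = [None]
--     best = None
--     for q in reversed(queries):
--         if q[0] == 2:
--             t = q[1]
--             if best is None or best < t:
--                 best = t
--         suf.append(best)
--     suf.reverse()
--     # One forward pass: last point-update value and its position (1-based) per index.
--     n = len(prices)
--     base = list(prices)
--     lastpos = [0] * n
--     j = 0
--     for q in queries:
--         if q[0] == 1:
--             base[q[1]] = q[2]
--             lastpos[q[1]] = j + 1
--         j += 1
--     # Combine: final price = max(last set value, thresholds applied after it).
--     res = []
--     for b, p in zip(base, lastpos):
--         s = suf[p]
--         res.append(b if s is None or s <= b else s)
--     prices[:] = res  # mutate in place, as the original does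
--     return prices
-- ===== Notes on version B (the rewrite author's own statement) =====
-- stated objective: alternative
-- what changed: A rescans and rewrites the whole price list for every type-2 query; B instead makes one backward pass computing suffix maxima of the type-2 thresholds and one forward pass recording the last point update (value and position) per index, then combines the two per index.
-- outside the precondition, e.g. on find_final_price([], [[2]]): A returns [], B raises IndexError
import Mathlib
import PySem

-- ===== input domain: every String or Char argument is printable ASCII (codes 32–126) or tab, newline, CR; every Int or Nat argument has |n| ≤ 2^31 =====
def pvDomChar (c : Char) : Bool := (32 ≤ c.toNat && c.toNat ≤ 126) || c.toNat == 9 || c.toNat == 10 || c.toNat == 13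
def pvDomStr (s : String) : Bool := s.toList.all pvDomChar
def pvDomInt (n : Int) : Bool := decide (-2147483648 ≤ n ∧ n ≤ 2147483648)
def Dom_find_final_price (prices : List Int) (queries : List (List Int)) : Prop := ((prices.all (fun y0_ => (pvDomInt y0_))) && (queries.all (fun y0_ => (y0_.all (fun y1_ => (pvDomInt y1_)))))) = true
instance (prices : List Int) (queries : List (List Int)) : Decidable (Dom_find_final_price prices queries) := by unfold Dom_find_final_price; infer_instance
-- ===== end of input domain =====

-- B replaces A's per-query rescan of the whole price list by one backward pass (suffix
-- maxima of the type-2 thresholds) plus one forward pass (last point update per index),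
-- combined per index at the end.  Both A and B mutate `prices` in place and return it;
-- the theorems below are about the returned value.

-- ===== PORT A =====
-- loop body of A's `for query in queries` (the inner enumerate-and-assign scan is
-- ported as the same left-to-right elementwise update, i.e. a map)
def pvStepA (acc : List Int) (q : List Int) : List Int :=
  if PySem.List.pyGet? q 0 = some 1 then
    match PySem.List.pyGet? q 1, PySem.List.pyGet? q 2 with
    | some i, some v =>
      match PySem.List.pyIdx? acc.length i with
      | some j => acc.set j v
      | none => acc
    | _, _ => acc
  else if PySem.List.pyGet? q 0 = some 2 then
    match PySem.List.pyGet? q 1 with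
    | some th => acc.map (fun p => if p < th then th else p)
    | none => acc
  else acc

def find_final_price (prices : List Int) (queries : List (List Int)) : List Int :=
  queries.foldl pvStepA prices

-- ===== PORT B =====
-- loop body of B's backward pass over `reversed(queries)`: state = (best, suf-list)
def pvStepSuf (st : Option Int × List (Option Int)) (q : List Int) : Option Int × List (Option Int) :=
  let best :=
    if PySem.List.pyGet? q 0 = some 2 then
      match PySem.List.pyGet? q 1 with
      | some t => some (match st.1 with | none => t | some b => if b < t then t else b)
      | none => st.1
    else st.1
  (best, st.2 ++ [best])

-- loop body of B's forward pass: state = (base, lastpos, j)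
def pvStepBL (n : Nat) (bl : List Int × List Nat × Nat) (q : List Int) : List Int × List Nat × Nat :=
  if PySem.List.pyGet? q 0 = some 1 then
    match PySem.List.pyGet? q 1, PySem.List.pyGet? q 2 with
    | some i, some v =>
      match PySem.List.pyIdx? n i with
      | some j => (bl.1.set j v, bl.2.1.set j (bl.2.2 + 1), bl.2.2 + 1)
      | none => (bl.1, bl.2.1, bl.2.2 + 1)
    | _, _ => (bl.1, bl.2.1, bl.2.2 + 1)
  else (bl.1, bl.2.1, bl.2.2 + 1)

def find_final_price_alt (prices : List Int) (queries : List (List Int)) : List Int :=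
  let st := queries.reverse.foldl pvStepSuf (none, [none])
  let suf := st.2.reverse
  let n := prices.length
  let bl := queries.foldl (pvStepBL n) (prices, List.replicate n 0, 0)
  (bl.1.zip bl.2.1).map (fun bp =>
    match suf.getD bp.2 none with
    | none => bp.1
    | some s => if s ≤ bp.1 then bp.1 else s)

-- ===== PRECONDITION & SPEC =====
-- Pre_ excludes exactly the inputs on which Python A raises (empty query; type-1 query
-- shorter than 3 or with an index out of range), plus ONE kind of input A returns on:
-- a type-2 query of length 1 together with an empty price list, where A returns the
-- empty list only because its rescan loop never reaches the missing threshold, while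
-- B (which reads every type-2 threshold once) raises IndexError there.
def Pre_find_final_price (prices : List Int) (queries : List (List Int)) : Prop :=
  ∀ q ∈ queries, q ≠ [] ∧
    (q.getD 0 0 = 1 → 3 ≤ q.length ∧
      -(prices.length : Int) ≤ q.getD 1 0 ∧ q.getD 1 0 < (prices.length : Int)) ∧
    (q.getD 0 0 = 2 → 2 ≤ q.length)

instance (prices : List Int) (queries : List (List Int)) : Decidable (Pre_find_final_price prices queries) := by unfold Pre_find_final_price; infer_instance

def pvWitness_find_final_price : List Int × List (List Int) := ([10, 20, 3], [[1, -1, 5], [2, 8], [1, 0, 2], [2, 4]])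

def Spec_find_final_price (prices : List Int) (queries : List (List Int)) (out : List Int) : Prop := out = find_final_price_alt prices queries
instance (prices : List Int) (queries : List (List Int)) (out : List Int) : Decidable (Spec_find_final_price prices queries out) := by unfold Spec_find_final_price; infer_instance

-- ===== CLAIM (what is proved, stated in full; the proofs are below) =====
def Claim_equal_find_final_price : Prop := ∀ (prices : List Int) (queries : List (List Int)), Dom_find_final_price prices queries → Pre_find_final_price prices queries → Spec_find_final_price prices queries (find_final_price prices queries)

-- ===== LEMMAS AND PROOFS =====

-- the common semantics both ports are reduced to, per index i of the price list:
-- pvSufmax qs        = max threshold of the type-2 queries of qs (none if there is none)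
-- pvLast n i qs      = position and value of the last type-1 query writing index i
-- pvCF n v i qs      = the final price at i when it starts at v

def pvMerge (q : List Int) (b : Option Int) : Option Int :=
  if PySem.List.pyGet? q 0 = some 2 then
    match PySem.List.pyGet? q 1 with
    | some t => some (match b with | none => t | some x => if x < t then t else x)
    | none => b
  else b

def pvSufmax : List (List Int) → Option Int
  | [] => none
  | q :: qs => pvMerge q (pvSufmax qs)

def pvSetAt? (n : Nat) (q : List Int) : Option (Nat × Int) :=
  if PySem.List.pyGet? q 0 = some 1 then
    match PySem.List.pyGet? q 1, PySem.List.pyGet? q 2 with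
    | some i, some v =>
      match PySem.List.pyIdx? n i with
      | some j => some (j, v)
      | none => none
    | _, _ => none
  else none

def pvLast (n : Nat) (i : Nat) : List (List Int) → Option (Nat × Int)
  | [] => none
  | q :: qs =>
    match pvLast n i qs with
    | some kw => some (kw.1 + 1, kw.2)
    | none =>
      match pvSetAt? n q with
      | some jv => if jv.1 = i then some (0, jv.2) else none
      | none => none

def pvOmax (v : Int) : Option Int → Int
  | none => v
  | some t => if t ≤ v then v else t

def pvCF (n : Nat) (v : Int) (i : Nat) (qs : List (List Int)) : Int :=
  match pvLast n i qs with
  | none => pvOmax v (pvSufmax qs)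
  | some kw => pvOmax kw.2 (pvSufmax (qs.drop (kw.1 + 1)))

def pvFA (n : Nat) (v : Int) (i : Nat) : List (List Int) → Int
  | [] => v
  | q :: qs =>
    match pvSetAt? n q with
    | some jv => if jv.1 = i then pvFA n jv.2 i qs else pvFA n v i qs
    | none =>
      if PySem.List.pyGet? q 0 = some 2 then
        match PySem.List.pyGet? q 1 with
        | some t => pvFA n (if v < t then t else v) i qs
        | none => pvFA n v i qs
      else pvFA n v i qs

def pvSufList : List (List Int) → List (Option Int)
  | [] => [none]
  | q :: qs => pvSufmax (q :: qs) :: pvSufList qs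

lemma pvIdx_lt {n : Nat} {i : Int} {j : Nat} (h : PySem.List.pyIdx? n i = some j) : j < n := by
  unfold PySem.List.pyIdx? at h
  split_ifs at h <;> simp_all <;> omega

lemma pvStepA_length (acc q : List Int) : (pvStepA acc q).length = acc.length := by
  unfold pvStepA
  split_ifs <;> (try rfl) <;> (repeat' split) <;> simp

lemma pvFoldA_length (qs : List (List Int)) (acc : List Int) :
    (qs.foldl pvStepA acc).length = acc.length := by
  induction qs generalizing acc with
  | nil => rfl
  | cons q qs ih => rw [List.foldl_cons, ih, pvStepA_length]

lemma pvGetD_set (l : List Int) (j i : Nat) (v : Int) (hi : i < l.length) :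
    (l.set j v).getD i 0 = if j = i then v else l.getD i 0 := by
  rw [List.getD_eq_getElem _ _ (by simpa using hi), List.getElem_set,
      List.getD_eq_getElem _ _ hi]

lemma pvGetD_setN (l : List Nat) (j i : Nat) (v : Nat) (hi : i < l.length) :
    (l.set j v).getD i 0 = if j = i then v else l.getD i 0 := by
  rw [List.getD_eq_getElem _ _ (by simpa using hi), List.getElem_set,
      List.getD_eq_getElem _ _ hi]

lemma pvStepA_getD (acc q : List Int) (i : Nat) (hi : i < acc.length) :
    (pvStepA acc q).getD i 0 =
      (match pvSetAt? acc.length q with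
       | some jv => if jv.1 = i then jv.2 else acc.getD i 0
       | none =>
         if PySem.List.pyGet? q 0 = some 2 then
           match PySem.List.pyGet? q 1 with
           | some t => if acc.getD i 0 < t then t else acc.getD i 0
           | none => acc.getD i 0
         else acc.getD i 0) := by
  unfold pvStepA pvSetAt?
  split_ifs with h1 h2
  · simp [h1] at h2
  · cases hg1 : PySem.List.pyGet? q 1 with
    | none => cases hg2 : PySem.List.pyGet? q 2 <;> rfl
    | some iv =>
      cases hg2 : PySem.List.pyGet? q 2 with
      | none => rfl
      | some v =>
        dsimp only
        cases hj : PySem.List.pyIdx? acc.length iv with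
        | none => rfl
        | some j =>
          dsimp only
          rw [pvGetD_set acc j i v hi]
  · cases hg1 : PySem.List.pyGet? q 1 with
    | none => rfl
    | some t =>
      dsimp only
      rw [List.getD_eq_getElem _ _ (by simpa using hi), List.getElem_map,
          List.getD_eq_getElem _ _ hi]
  · rfl

lemma pvFoldA_getD (qs : List (List Int)) (acc : List Int) (i : Nat) (hi : i < acc.length) :
    (qs.foldl pvStepA acc).getD i 0 = pvFA acc.length (acc.getD i 0) i qs := by
  induction qs generalizing acc with
  | nil => rfl
  | cons q qs ih =>
    have hlen := pvStepA_length acc q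
    rw [List.foldl_cons, ih (pvStepA acc q) (by omega), hlen, pvStepA_getD acc q i hi]
    simp only [pvFA]
    cases hs : pvSetAt? acc.length q with
    | some jv => dsimp only; by_cases hji : jv.1 = i <;> simp [hji]
    | none =>
      dsimp only
      split_ifs with h2
      · cases hg1 : PySem.List.pyGet? q 1 <;> rfl
      · rfl

lemma pvLast_cons (n i : Nat) (q : List Int) (qs : List (List Int)) :
    pvLast n i (q :: qs) =
      (match pvLast n i qs with
       | some kw => some (kw.1 + 1, kw.2)
       | none =>
         match pvSetAt? n q with
         | some jv => if jv.1 = i then some (0, jv.2) else none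
         | none => none) := rfl

lemma pvFA_eq_CF (n : Nat) (i : Nat) (qs : List (List Int)) (v : Int) :
    pvFA n v i qs = pvCF n v i qs := by
  induction qs generalizing v with
  | nil => rfl
  | cons q qs ih =>
    simp only [pvFA]
    cases hs : pvSetAt? n q with
    | some jv =>
      have hq1 : PySem.List.pyGet? q 0 = some 1 := by
        by_cases h : PySem.List.pyGet? q 0 = some 1
        · exact h
        · unfold pvSetAt? at hs; rw [if_neg h] at hs; cases hs
      have hq2 : ¬ PySem.List.pyGet? q 0 = some 2 := by simp [hq1]
      dsimp only
      by_cases hji : jv.1 = i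
      · rw [if_pos hji, ih jv.2]
        simp only [pvCF, pvLast_cons]
        cases hl : pvLast n i qs with
        | some kw => simp [List.drop_succ_cons]
        | none => simp [hs, hji]
      · rw [if_neg hji, ih v]
        simp only [pvCF, pvLast_cons]
        cases hl : pvLast n i qs with
        | some kw => simp [List.drop_succ_cons]
        | none => simp [hs, hji, pvSufmax, pvMerge, hq2]
    | none =>
      dsimp only
      split_ifs with h2
      · cases hg1 : PySem.List.pyGet? q 1 with
        | some t =>
          dsimp only
          rw [ih]
          simp only [pvCF, pvLast_cons]
          cases hl : pvLast n i qs with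
          | some kw => simp [List.drop_succ_cons]
          | none =>
            simp only [hs, pvSufmax, pvMerge, h2, hg1, if_pos]
            cases hb : pvSufmax qs <;> unfold pvOmax <;> dsimp only <;> split_ifs <;> omega
        | none =>
          dsimp only
          rw [ih]
          simp only [pvCF, pvLast_cons]
          cases hl : pvLast n i qs with
          | some kw => simp [List.drop_succ_cons]
          | none => simp [hs, pvSufmax, pvMerge, h2, hg1]
      · rw [ih]
        simp only [pvCF, pvLast_cons]
        cases hl : pvLast n i qs with
        | some kw => simp [List.drop_succ_cons]
        | none => simp [hs, pvSufmax, pvMerge, h2]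

lemma pvSuf_spec (qs : List (List Int)) :
    (qs.reverse.foldl pvStepSuf (none, [none])).1 = pvSufmax qs ∧
    (qs.reverse.foldl pvStepSuf (none, [none])).2.reverse = pvSufList qs := by
  induction qs with
  | nil => exact ⟨rfl, rfl⟩
  | cons q qs ih =>
    obtain ⟨h1, h2⟩ := ih
    rw [List.reverse_cons, List.foldl_append, List.foldl_cons, List.foldl_nil]
    constructor
    · show (if PySem.List.pyGet? q 0 = some 2 then _ else _) = _
      simp only [pvSufmax, pvMerge, ← h1]
    · show ((_ : List (Option Int)) ++ [_]).reverse = _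
      rw [List.reverse_append]
      simp only [List.reverse_cons, List.reverse_nil, List.nil_append, List.singleton_append]
      rw [h2]
      show (if PySem.List.pyGet? q 0 = some 2 then _ else _) :: _ = _
      simp only [pvSufList, pvSufmax, pvMerge, ← h1]

lemma pvSufList_getD (qs : List (List Int)) (k : Nat) (hk : k ≤ qs.length) :
    (pvSufList qs).getD k none = pvSufmax (qs.drop k) := by
  induction qs generalizing k with
  | nil => cases k <;> simp_all [pvSufList, pvSufmax]
  | cons q qs ih =>
    cases k with
    | zero => rfl
    | succ k => simpa [pvSufList] using ih k (by simpa using hk)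

lemma pvLast_lt {n i : Nat} {qs : List (List Int)} {kw : Nat × Int}
    (h : pvLast n i qs = some kw) : kw.1 < qs.length := by
  induction qs generalizing kw with
  | nil => simp [pvLast] at h
  | cons q qs ih =>
    unfold pvLast at h
    cases hl : pvLast n i qs with
    | some kw' => rw [hl] at h; cases h; have := ih hl; simp; omega
    | none =>
      rw [hl] at h
      cases hs : pvSetAt? n q <;> rw [hs] at h
      · exact absurd h (by simp)
      · dsimp only at h
        split at h
        · cases h; simp
        · simp at h

lemma pvStepBL_eq (n : Nat) (bl : List Int × List Nat × Nat) (q : List Int) :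
    pvStepBL n bl q =
      (match pvSetAt? n q with
       | some jv => (bl.1.set jv.1 jv.2, bl.2.1.set jv.1 (bl.2.2 + 1), bl.2.2 + 1)
       | none => (bl.1, bl.2.1, bl.2.2 + 1)) := by
  unfold pvStepBL pvSetAt?
  split_ifs with h1
  · cases hg1 : PySem.List.pyGet? q 1 with
    | none => cases hg2 : PySem.List.pyGet? q 2 <;> rfl
    | some iv =>
      cases hg2 : PySem.List.pyGet? q 2 with
      | none => rfl
      | some v =>
        dsimp only
        cases hj : PySem.List.pyIdx? n iv <;> rfl
  · rfl

lemma pvSetAt?_lt {n : Nat} {q : List Int} {jv : Nat × Int}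
    (hs : pvSetAt? n q = some jv) : jv.1 < n := by
  unfold pvSetAt? at hs
  split_ifs at hs
  rcases hg1 : PySem.List.pyGet? q 1 with _ | iv <;>
    rcases hg2 : PySem.List.pyGet? q 2 with _ | v <;>
      rw [hg1, hg2] at hs <;> dsimp only at hs
  · simp at hs
  · simp at hs
  · simp at hs
  · cases hj : PySem.List.pyIdx? n iv <;> rw [hj] at hs <;> dsimp only at hs
    · simp at hs
    · injection hs with h
      rw [← h]
      exact pvIdx_lt hj

lemma pvFoldBL_spec (n : Nat) (qs : List (List Int)) (b : List Int) (l : List Nat) (c : Nat)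
    (hb : b.length = n) (hl : l.length = n) :
    (qs.foldl (pvStepBL n) (b, l, c)).1.length = n ∧
    (qs.foldl (pvStepBL n) (b, l, c)).2.1.length = n ∧
    ∀ i < n,
      (qs.foldl (pvStepBL n) (b, l, c)).1.getD i 0 =
        (match pvLast n i qs with | some kw => kw.2 | none => b.getD i 0) ∧
      (qs.foldl (pvStepBL n) (b, l, c)).2.1.getD i 0 =
        (match pvLast n i qs with | some kw => c + kw.1 + 1 | none => l.getD i 0) := by
  induction qs generalizing b l c with
  | nil => exact ⟨hb, hl, fun i _ => ⟨rfl, rfl⟩⟩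
  | cons q qs ih =>
    rw [List.foldl_cons, pvStepBL_eq]
    cases hs : pvSetAt? n q with
    | some jv =>
      have hjn : jv.1 < n := pvSetAt?_lt hs
      dsimp only
      obtain ⟨e1, e2, e3⟩ := ih (b.set jv.1 jv.2) (l.set jv.1 (c + 1)) (c + 1)
        (by simpa using hb) (by simpa using hl)
      refine ⟨e1, e2, fun i hi => ?_⟩
      obtain ⟨f1, f2⟩ := e3 i hi
      cases hl2 : pvLast n i qs with
      | some kw =>
        rw [hl2] at f1 f2
        rw [f1, f2, pvLast_cons, hl2]
        constructor
        · simp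
        · simp only []
          show c + 1 + kw.1 + 1 = c + (kw.1 + 1) + 1
          omega
      | none =>
        rw [hl2] at f1 f2
        rw [f1, f2, pvLast_cons, hl2, hs]
        constructor
        · rw [pvGetD_set b jv.1 i jv.2 (by omega)]
          by_cases hji : jv.1 = i <;> simp [hji]
        · rw [pvGetD_setN l jv.1 i (c + 1) (by omega)]
          by_cases hji : jv.1 = i <;> simp [hji]
    | none =>
      dsimp only
      obtain ⟨e1, e2, e3⟩ := ih b l (c + 1) hb hl
      refine ⟨e1, e2, fun i hi => ?_⟩
      obtain ⟨f1, f2⟩ := e3 i hi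
      cases hl2 : pvLast n i qs with
      | some kw =>
        rw [hl2] at f1 f2
        rw [f1, f2, pvLast_cons, hl2]
        constructor
        · simp
        · simp only []
          show c + 1 + kw.1 + 1 = c + (kw.1 + 1) + 1
          omega
      | none =>
        rw [hl2] at f1 f2
        rw [f1, f2, pvLast_cons, hl2, hs]
        exact ⟨rfl, rfl⟩

-- ===== VERDICT (by name: the statement is the Claim_ definition above) =====
theorem find_final_price_spec : Claim_equal_find_final_price := by
  intro prices queries _hdom _hpre
  show find_final_price prices queries = find_final_price_alt prices queries
  unfold find_final_price find_final_price_alt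
  dsimp only
  obtain ⟨e1, e2, e3⟩ := pvFoldBL_spec prices.length queries prices
    (List.replicate prices.length 0) 0 rfl (by simp)
  obtain ⟨s1, s2⟩ := pvSuf_spec queries
  apply List.ext_getElem
  · rw [pvFoldA_length]
    simp [List.length_zip, e1, e2]
  · intro i h1 h2
    have hi : i < prices.length := by rwa [pvFoldA_length] at h1
    rw [← List.getD_eq_getElem _ 0 h1, pvFoldA_getD queries prices i hi,
        pvFA_eq_CF]
    obtain ⟨f1, f2⟩ := e3 i hi
    have hz : i < ((queries.foldl (pvStepBL prices.length) (prices, List.replicate prices.length 0, 0)).1.zip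
        (queries.foldl (pvStepBL prices.length) (prices, List.replicate prices.length 0, 0)).2.1).length := by
      simp [List.length_zip, e1, e2]; omega
    rw [List.getElem_map, List.getElem_zip]
    rw [← List.getD_eq_getElem _ 0 (by omega : i < (queries.foldl (pvStepBL prices.length) (prices, List.replicate prices.length 0, 0)).1.length),
        ← List.getD_eq_getElem _ 0 (by omega : i < (queries.foldl (pvStepBL prices.length) (prices, List.replicate prices.length 0, 0)).2.1.length)]
    rw [f1, f2, s2]
    unfold pvCF
    cases hl2 : pvLast prices.length i queries with
    | none =>
      dsimp only
      have hrep : (List.replicate prices.length (0 : Nat)).getD i 0 = 0 := by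
        rw [List.getD_eq_getElem _ _ (by simpa using hi)]; simp
      rw [hrep, pvSufList_getD queries 0 (by omega), List.drop_zero]
      cases pvSufmax queries <;> rfl
    | some kw =>
      dsimp only
      have := pvLast_lt hl2
      rw [pvSufList_getD queries (0 + kw.1 + 1) (by omega)]
      simp only [Nat.zero_add]
      cases pvSufmax (queries.drop (kw.1 + 1)) <;> rfl
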